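-- pv_equiv track=rewrite | github.com/ai4co/reevo | utils/utils.py | filter_code
-- ===== SOURCE A (Python) =====
-- def filter_code(code_string):
--     """Remove lines containing signature and import statements."""
--     lines = code_string.split('\n')
--     filtered_lines = []
--     for line in lines:
--         if line.startswith('def'):
--             continue
--         elif line.startswith('import'):
--             continue
--         elif line.startswith('from'):
--             continue
--         elif line.startswith('return'):
--             filtered_lines.append(line)
--             break
--         else:
--             filtered_lines.append(line)
--     code_string = '\n'.join(filtered_lines)
--     return code_string
-- ===== SOURCE B (Python) =====
-- def filter_code(code_string):
--     """Remove lines containing signature and import statements."""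
--     lines = code_string.split('\n')
--     idx = next((i for i, l in enumerate(lines) if l.startswith('return')), len(lines))
--     prefix = lines[:idx + 1]
--     return '\n'.join(l for l in prefix if not l.startswith(('def', 'import', 'from')))
-- ===== Notes on version B (the rewrite author's own statement) =====
-- stated objective: simpler
-- what changed: Replaces the stateful loop with break by locating the cutoff (first line starting with 'return') and then filtering the prefix with a single comprehension.
import Mathlib
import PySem

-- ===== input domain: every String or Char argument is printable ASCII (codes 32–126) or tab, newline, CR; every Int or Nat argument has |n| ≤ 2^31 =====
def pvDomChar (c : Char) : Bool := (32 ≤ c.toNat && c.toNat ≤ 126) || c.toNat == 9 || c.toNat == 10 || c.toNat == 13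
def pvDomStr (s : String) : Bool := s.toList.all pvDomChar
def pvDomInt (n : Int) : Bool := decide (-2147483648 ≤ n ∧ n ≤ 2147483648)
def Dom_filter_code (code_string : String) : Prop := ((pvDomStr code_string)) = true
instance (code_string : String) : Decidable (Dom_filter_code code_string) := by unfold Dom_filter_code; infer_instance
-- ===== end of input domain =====

-- B changes the decomposition: locate the cutoff index of the first 'return' line, then filter that prefix in one comprehension (objective: simpler).

-- ===== PORT A =====
-- A's loop with break: skip def/import/from lines, keep others, stop right after a line starting with 'return'
def pvLoopA : List String → List String
  | [] => []
  | l :: ls =>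
    if PySem.Str.startswith l "def" then pvLoopA ls
    else if PySem.Str.startswith l "import" then pvLoopA ls
    else if PySem.Str.startswith l "from" then pvLoopA ls
    else if PySem.Str.startswith l "return" then [l]
    else l :: pvLoopA ls

def filter_code (code_string : String) : String :=
  let lines := (PySem.Str.split? code_string "\n").getD []   -- sep "\n" ≠ "", so split? is always some
  PySem.Str.join "\n" (pvLoopA lines)

-- ===== PORT B =====
-- index of the first line starting with 'return', defaulting to len(lines)  (Source B's next(..., len(lines)))
def pvCutoff (lines : List String) : Nat :=
  (lines.findIdx? (fun l => PySem.Str.startswith l "return")).getD lines.length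

def pvKeep (l : String) : Bool :=
  !(PySem.Str.startswith l "def" || PySem.Str.startswith l "import" || PySem.Str.startswith l "from")

def filter_code_alt (code_string : String) : String :=
  let lines := (PySem.Str.split? code_string "\n").getD []   -- sep "\n" ≠ "", so split? is always some
  PySem.Str.join "\n" ((lines.take (pvCutoff lines + 1)).filter pvKeep)

-- ===== PRECONDITION & SPEC =====
def Spec_filter_code (code_string : String) (out : String) : Prop := out = filter_code_alt code_string
instance (code_string : String) (out : String) : Decidable (Spec_filter_code code_string out) := by unfold Spec_filter_code; infer_instance

-- ===== CLAIM (what is proved, stated in full; the proofs are below) =====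
def Claim_equal_filter_code : Prop := ∀ (code_string : String), Dom_filter_code code_string → Spec_filter_code code_string (filter_code code_string)

-- ===== LEMMAS AND PROOFS =====

-- two nonempty prefixes with different first characters cannot both start a string
theorem pv_sw_disj (l : List Char) (a b : Char) (as bs : List Char) (hab : a ≠ b)
    (h : PySem.Chars.startswith l (a :: as) = true) :
    PySem.Chars.startswith l (b :: bs) = false := by
  rw [PySem.Chars.startswith_iff] at h
  rw [Bool.eq_false_iff, Ne, PySem.Chars.startswith_iff]
  intro h2
  obtain ⟨t, ht⟩ := h
  obtain ⟨u, hu⟩ := h2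
  rw [← ht, List.cons_append, List.cons_append, List.cons.injEq] at hu
  exact hab hu.1.symm

theorem pv_cutoff_cons_pos (l : String) (ls : List String)
    (h : PySem.Str.startswith l "return" = true) : pvCutoff (l :: ls) = 0 := by
  simp only [pvCutoff, List.findIdx?_cons, h]
  simp

theorem pv_cutoff_cons_neg (l : String) (ls : List String)
    (h : PySem.Str.startswith l "return" = false) :
    pvCutoff (l :: ls) = pvCutoff ls + 1 := by
  simp only [pvCutoff, List.findIdx?_cons, h, List.length_cons]
  cases List.findIdx? (fun l => PySem.Str.startswith l "return") ls <;> simp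

-- the break-loop of A equals B's take-then-filter of the same line list
theorem pv_loop_eq (ls : List String) :
    pvLoopA ls = (ls.take (pvCutoff ls + 1)).filter pvKeep := by
  induction ls with
  | nil => simp [pvLoopA]
  | cons l ls ih =>
    by_cases hr : PySem.Chars.startswith l.toList ['r','e','t','u','r','n'] = true
    · rw [pv_cutoff_cons_pos l ls (by simpa using hr)]
      have hd := pv_sw_disj l.toList 'r' 'd' ['e','t','u','r','n'] ['e','f'] (by decide) hr
      have hi := pv_sw_disj l.toList 'r' 'i' ['e','t','u','r','n'] ['m','p','o','r','t'] (by decide) hr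
      have hf := pv_sw_disj l.toList 'r' 'f' ['e','t','u','r','n'] ['r','o','m'] (by decide) hr
      simp [pvLoopA, pvKeep, List.filter_cons, hd, hi, hf, hr]
    · have hr' := Bool.eq_false_iff.mpr hr
      rw [pv_cutoff_cons_neg l ls (by simpa using hr'), List.take_succ_cons,
        List.filter_cons]
      by_cases hd : PySem.Chars.startswith l.toList ['d','e','f'] = true
      · simp [pvLoopA, pvKeep, hd, ih]
      · by_cases hi : PySem.Chars.startswith l.toList ['i','m','p','o','r','t'] = true
        · simp [pvLoopA, pvKeep, hd, hi, ih]
        · by_cases hf : PySem.Chars.startswith l.toList ['f','r','o','m'] = true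
          · simp [pvLoopA, pvKeep, hd, hi, hf, ih]
          · simp [pvLoopA, pvKeep, hd, hi, hf, hr', ih]

-- ===== VERDICT (by name: the statement is the Claim_ definition above) =====
theorem filter_code_spec : Claim_equal_filter_code := by
  intro s _
  unfold Spec_filter_code filter_code filter_code_alt
  simp only [pv_loop_eq]
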